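-- pv_equiv track=rewrite | github.com/jennybae1024/t2t_test | usr_dir/systematic_sequence.py | generate_seq
-- ===== SOURCE A (Python) =====
-- def generate_seq(first_term, second_term):
--     seq = ""
--     temp1 = first_term
--     temp2 = second_term
--     seq += str(temp1)+" "+str(temp2)+" "
--     while len(seq) < 41:
--         next_temp2 = temp2 + temp1
--         temp1 = temp2
--         temp2 = next_temp2
--         seq += str(temp2) + " "
--     seq = seq[:40]
--     return seq[:20], seq[20:]
-- ===== SOURCE B (Python) =====
-- def generate_seq(first_term, second_term):
--     a, b = first_term, second_term
--     terms = []
--     for _ in range(60):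
--         terms.append(str(a))
--         a, b = b, a + b
--     seq = " ".join(terms)[:40]
--     return seq[:20], seq[20:]
-- ===== Notes on version B (the rewrite author's own statement) =====
-- stated objective: simpler
-- what changed: Replaces A's grow-until-41-chars while loop over an accumulating string with fixed generation of 60 terms into a list joined once with ' '.join, then a single truncate and split; the 40-char prefix is the same either way.
import Mathlib
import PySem

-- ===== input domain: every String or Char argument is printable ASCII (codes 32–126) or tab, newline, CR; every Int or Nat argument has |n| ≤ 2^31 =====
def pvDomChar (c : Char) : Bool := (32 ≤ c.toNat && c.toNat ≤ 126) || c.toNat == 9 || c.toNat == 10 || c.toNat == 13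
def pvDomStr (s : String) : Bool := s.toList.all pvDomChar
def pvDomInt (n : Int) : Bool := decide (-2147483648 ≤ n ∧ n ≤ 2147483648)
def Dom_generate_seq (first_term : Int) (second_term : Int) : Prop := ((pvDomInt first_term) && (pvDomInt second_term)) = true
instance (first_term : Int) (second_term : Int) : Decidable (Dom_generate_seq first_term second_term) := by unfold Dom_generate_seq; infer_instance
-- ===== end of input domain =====

-- B replaces A's grow-until-41-chars while loop on an accumulating string by generating a
-- fixed 60 terms into a list, joining once with " ", truncating to 40 chars and splitting
-- (objective: simpler decomposition; same return value, no mutation involved).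

-- ===== PORT A =====
-- str(n) always has at least one character; needed by the loop's termination argument.
theorem pvToChars_len_pos (n : Int) : 1 ≤ (PySem.Int.toChars n).length := by
  unfold PySem.Int.toChars
  split
  · simp
  · exact Nat.length_toDigits_pos

-- A's while loop: while len(seq) < 41: next = temp2 + temp1; shift; seq += str(next) + " "
def genLoopA (seq : List Char) (temp1 temp2 : Int) : List Char :=
  if seq.length < 41 then
    genLoopA (seq ++ PySem.Int.toChars (temp2 + temp1) ++ [' ']) temp2 (temp2 + temp1)
  else seq
termination_by 41 - seq.length
decreasing_by
  have := pvToChars_len_pos (temp2 + temp1)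
  simp only [List.length_append, List.length_cons, List.length_nil]
  omega

def generate_seq (first_term : Int) (second_term : Int) : String × String :=
  -- seq = ""; seq += str(temp1)+" "+str(temp2)+" "
  let seq0 : List Char := ([] : List Char) ++ PySem.Int.toChars first_term ++ [' ']
      ++ PySem.Int.toChars second_term ++ [' ']
  let grown := genLoopA seq0 first_term second_term
  let seq := PySem.List.slice grown none (some 40)          -- seq = seq[:40]
  (String.ofList (PySem.List.slice seq none (some 20)),     -- seq[:20]
   String.ofList (PySem.List.slice seq (some 20) none))     -- seq[20:]

-- ===== PORT B =====
-- for _ in range(60): terms.append(str(a)); a, b = b, a + b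
def bTerms (a b : Int) : Nat → List (List Char)
  | 0 => []
  | n+1 => PySem.Int.toChars a :: bTerms b (a + b) n

def generate_seq_alt (first_term : Int) (second_term : Int) : String × String :=
  let terms := bTerms first_term second_term 60
  let seq := PySem.List.slice (PySem.Chars.join [' '] terms) none (some 40)  -- " ".join(terms)[:40]
  (String.ofList (PySem.List.slice seq none (some 20)),
   String.ofList (PySem.List.slice seq (some 20) none))

-- ===== PRECONDITION & SPEC =====
def Spec_generate_seq (first_term : Int) (second_term : Int) (out : String × String) : Prop := out = generate_seq_alt first_term second_term
instance (first_term : Int) (second_term : Int) (out : String × String) : Decidable (Spec_generate_seq first_term second_term out) := by unfold Spec_generate_seq; infer_instance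

-- ===== CLAIM (what is proved, stated in full; the proofs are below) =====
def Claim_equal_generate_seq : Prop := ∀ (first_term : Int) (second_term : Int), Dom_generate_seq first_term second_term → Spec_generate_seq first_term second_term (generate_seq first_term second_term)

-- ===== LEMMAS AND PROOFS =====

-- the infinite term stream, cut after n terms, each term followed by one space
def catStream (a b : Int) : Nat → List Char
  | 0 => []
  | n+1 => PySem.Int.toChars a ++ [' '] ++ catStream b (a + b) n

theorem catStream_len (a b : Int) (n : Nat) : 2 * n ≤ (catStream a b n).length := by
  induction n generalizing a b with
  | zero => simp [catStream]
  | succ m ih =>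
    have h1 := pvToChars_len_pos a
    have h2 := ih b (a + b)
    simp only [catStream, List.length_append, List.length_cons, List.length_nil]
    omega

theorem join_bTerms (n : Nat) (a b : Int) :
    PySem.Chars.join [' '] (bTerms a b (n + 1)) ++ [' '] = catStream a b (n + 1) := by
  induction n generalizing a b with
  | zero => simp [bTerms, catStream, PySem.Chars.join_singleton]
  | succ m ih =>
    show PySem.Chars.join [' '] (PySem.Int.toChars a :: bTerms b (a + b) (m + 1)) ++ [' '] = _
    have hb : bTerms b (a + b) (m + 1) = PySem.Int.toChars b :: bTerms (a + b) (b + (a + b)) m := rfl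
    rw [hb, PySem.Chars.join_cons_cons, ← hb]
    simp only [List.append_assoc]
    rw [ih b (a + b)]
    simp [catStream]

theorem loopA_take (n : Nat) : ∀ (s : List Char) (t1 t2 : Int), 41 ≤ s.length + 2 * n →
    (genLoopA s t1 t2).take 40 = (s ++ catStream (t1 + t2) (t1 + 2 * t2) n).take 40 := by
  induction n with
  | zero =>
    intro s t1 t2 h
    rw [genLoopA]
    simp only [catStream, List.append_nil]
    rw [if_neg (by omega)]
  | succ m ih =>
    intro s t1 t2 h
    rw [genLoopA]
    by_cases hl : s.length < 41
    · rw [if_pos hl]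
      have htc := pvToChars_len_pos (t2 + t1)
      have := ih (s ++ PySem.Int.toChars (t2 + t1) ++ [' ']) t2 (t2 + t1)
        (by simp only [List.length_append, List.length_cons, List.length_nil]; omega)
      rw [this]
      have e2 : t2 + (t2 + t1) = t1 + 2 * t2 := by ring
      have e3 : t2 + 2 * (t2 + t1) = (t1 + t2) + (t1 + 2 * t2) := by ring
      have e1 : t2 + t1 = t1 + t2 := by ring
      rw [e2, e3, e1]
      simp [catStream, List.append_assoc]
    · rw [if_neg hl]
      rw [List.take_append_of_le_length (by omega)]

theorem generate_seq_take40_eq (f s : Int) :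
    (genLoopA (([] : List Char) ++ PySem.Int.toChars f ++ [' '] ++ PySem.Int.toChars s ++ [' ']) f s).take 40
      = (PySem.Chars.join [' '] (bTerms f s 60)).take 40 := by
  set seq0 : List Char := ([] : List Char) ++ PySem.Int.toChars f ++ [' '] ++ PySem.Int.toChars s ++ [' '] with hs0
  have hA := loopA_take 58 seq0 f s (by
    have h1 := pvToChars_len_pos f
    have h2 := pvToChars_len_pos s
    simp only [hs0, List.length_append, List.length_cons, List.length_nil]
    omega)
  -- catStream f s 60 unfolds to seq0 ++ catStream (f+s) (f+2*s) 58
  have hstep : ∀ (a b : Int) (n : Nat), catStream a b (n + 1)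
      = PySem.Int.toChars a ++ [' '] ++ catStream b (a + b) n := fun _ _ _ => rfl
  have hcat : catStream f s 60 = seq0 ++ catStream (f + s) (f + 2 * s) 58 := by
    rw [show (60 : Nat) = 59 + 1 from rfl, hstep, show (59 : Nat) = 58 + 1 from rfl, hstep]
    have e : s + (f + s) = f + 2 * s := by ring
    rw [e]
    simp [hs0]
  have hJ : PySem.Chars.join [' '] (bTerms f s 60) ++ [' '] = catStream f s 60 := join_bTerms 59 f s
  have hlen : 40 ≤ (PySem.Chars.join [' '] (bTerms f s 60)).length := by
    have := catStream_len f s 60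
    have hl : (PySem.Chars.join [' '] (bTerms f s 60)).length + 1 = (catStream f s 60).length := by
      rw [← hJ]; simp
    omega
  rw [hA, ← hcat, ← hJ, List.take_append_of_le_length hlen]

-- ===== VERDICT (by name: the statement is the Claim_ definition above) =====
theorem generate_seq_spec : Claim_equal_generate_seq := by
  unfold Claim_equal_generate_seq
  intro f s _
  unfold Spec_generate_seq generate_seq generate_seq_alt
  have h40 := generate_seq_take40_eq f s
  simp only [PySem.List.slice_to _ (by norm_num : (0 : Int) ≤ 40)]
  norm_num at h40 ⊢
  rw [show Int.toNat 40 = 40 from rfl, h40]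
  exact ⟨rfl, rfl⟩
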